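-- pv_equiv track=rewrite | github.com/vitte-lang/vitte | tools/packages_impacted_strict.py | reverse_closure
-- ===== SOURCE A (Python) =====
-- def reverse_closure(pkgs: set[str], deps: dict[str, list[str]]) -> set[str]:
--     changed = set(pkgs)
--     while True:
--         added = set()
--         for p, pdeps in deps.items():
--             if p in changed:
--                 continue
--             if any(d in changed for d in pdeps):
--                 added.add(p)
--         if not added:
--             break
--         changed |= added
--     return changed
-- ===== SOURCE B (Python) =====
-- def reverse_closure(pkgs: set[str], deps: dict[str, list[str]]) -> set[str]:
--     changed = set(pkgs)
--     frontier = set(pkgs)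
--     pending = [(p, ds) for p, ds in deps.items() if p not in changed]
--     while True:
--         new = [(p, ds) for p, ds in pending if any(d in frontier for d in ds)]
--         if not new:
--             return changed
--         frontier = {p for p, _ in new}
--         changed |= frontier
--         pending = [(p, ds) for p, ds in pending if p not in frontier]
-- ===== Notes on version B (the rewrite author's own statement) =====
-- stated objective: alternative
-- what changed: A rescans every deps item each round and membership-tests each key and its dep list against the whole changed set; B keeps a shrinking pending worklist (resolved keys leave it, so the 'p in changed' test disappears) and tests dep lists only against the previous round's frontier.
import Mathlib
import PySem

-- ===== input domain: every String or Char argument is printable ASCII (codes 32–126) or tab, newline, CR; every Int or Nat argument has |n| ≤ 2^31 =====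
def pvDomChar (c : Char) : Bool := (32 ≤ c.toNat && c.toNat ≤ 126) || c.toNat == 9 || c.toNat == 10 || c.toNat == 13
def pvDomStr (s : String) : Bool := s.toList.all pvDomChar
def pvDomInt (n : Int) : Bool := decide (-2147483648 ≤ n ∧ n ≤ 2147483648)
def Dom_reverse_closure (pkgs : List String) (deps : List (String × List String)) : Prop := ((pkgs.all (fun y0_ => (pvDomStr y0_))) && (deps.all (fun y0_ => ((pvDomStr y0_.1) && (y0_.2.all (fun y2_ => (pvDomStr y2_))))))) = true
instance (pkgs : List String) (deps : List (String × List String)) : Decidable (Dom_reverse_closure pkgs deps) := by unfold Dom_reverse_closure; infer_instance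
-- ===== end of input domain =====

-- B replaces A's repeated full rescans of deps (with a membership test of every key against the
-- whole `changed` set each round) by a frontier worklist: only still-pending items are scanned,
-- and their dep lists are tested only against the keys added in the previous round.

-- ===== PORT A =====
-- one `for p, pdeps in deps.items()` scan building the set `added`
def pvAddedRound (changed : PySem.Set String) (items : List (String × List String)) : PySem.Set String :=
  items.foldl (fun added kv =>
    if changed.contains kv.1 then added
    else if kv.2.any (fun d => changed.contains d) then PySem.Set.add added kv.1
    else added) PySem.Set.empty

-- the `while True` loop; fuel = items.length + 1 always suffices (each non-break round adds at
-- least one fresh key of items), so the fuel cutoff is never reached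
def pvLoopA (items : List (String × List String)) (changed : PySem.Set String) : Nat → List String
  | 0 => changed
  | fuel + 1 =>
    if (pvAddedRound changed items).isEmpty then changed
    else pvLoopA items (PySem.Set.union changed (pvAddedRound changed items)) fuel

def reverse_closure (pkgs : List String) (deps : List (String × List String)) : List String :=
  pvLoopA (PySem.Dict.ofList deps).items (PySem.Set.ofList pkgs)
    ((PySem.Dict.ofList deps).items.length + 1)

-- ===== PORT B =====
-- Source B's `while True` loop: new = pending items with a dep in frontier; stop if none; else
-- frontier = their keys, changed |= frontier, pending loses the keys now in frontier.
-- fuel = pending.length + 1 always suffices (pending strictly shrinks each productive round)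
def pvNew (frontier : PySem.Set String) (pending : List (String × List String)) : List (String × List String) :=
  pending.filter (fun kv => kv.2.any (fun d => frontier.contains d))

def pvLoopB (changed frontier : PySem.Set String) (pending : List (String × List String)) : Nat → List String
  | 0 => changed
  | fuel + 1 =>
    if (pvNew frontier pending).isEmpty then changed
    else
      pvLoopB (PySem.Set.union changed (PySem.Set.ofList ((pvNew frontier pending).map (·.1))))
        (PySem.Set.ofList ((pvNew frontier pending).map (·.1)))
        (pending.filter (fun kv =>
          !(PySem.Set.ofList ((pvNew frontier pending).map (·.1))).contains kv.1)) fuel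

def reverse_closure_alt (pkgs : List String) (deps : List (String × List String)) : List String :=
  pvLoopB (PySem.Set.ofList pkgs) (PySem.Set.ofList pkgs)
    ((PySem.Dict.ofList deps).items.filter (fun kv => !(PySem.Set.ofList pkgs).contains kv.1))
    (((PySem.Dict.ofList deps).items.filter (fun kv => !(PySem.Set.ofList pkgs).contains kv.1)).length + 1)

-- ===== PRECONDITION & SPEC =====
def Spec_reverse_closure (pkgs : List String) (deps : List (String × List String)) (out : List String) : Prop := out = reverse_closure_alt pkgs deps
instance (pkgs : List String) (deps : List (String × List String)) (out : List String) : Decidable (Spec_reverse_closure pkgs deps out) := by unfold Spec_reverse_closure; infer_instance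

-- ===== CLAIM (what is proved, stated in full; the proofs are below) =====
def Claim_equal_reverse_closure : Prop := ∀ (pkgs : List String) (deps : List (String × List String)), Dom_reverse_closure pkgs deps → Spec_reverse_closure pkgs deps (reverse_closure pkgs deps)

-- ===== LEMMAS AND PROOFS =====

theorem length_filter_lt {α : Type} (l : List α) (p : α → Bool) (x : α)
    (hx : x ∈ l) (hp : p x = false) : (l.filter p).length < l.length := by
  induction l with
  | nil => cases hx
  | cons a t ih =>
    rcases List.mem_cons.1 hx with rfl | hm
    · rw [List.filter_cons, if_neg (by simp [hp])]
      exact Nat.lt_succ_of_le (List.length_filter_le _ _)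
    · by_cases hpa : p a = true
      · rw [List.filter_cons, if_pos (by simp [hpa])]
        simpa using Nat.succ_lt_succ (ih hm)
      · rw [List.filter_cons, if_neg (by simp_all)]
        exact Nat.lt_succ_of_lt (ih hm)

-- A's round builds exactly the keys of items passing "key not yet in changed, some dep in changed"
theorem addedRound_eq (changed : List String) (items : List (String × List String)) :
    pvAddedRound changed items =
      PySem.Set.ofList ((items.filter (fun kv =>
        !PySem.Set.contains changed kv.1 && kv.2.any (fun d => PySem.Set.contains changed d))).map (·.1)) := by
  have key : ∀ (l : List (String × List String)) (acc : List String),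
      l.foldl (fun added kv =>
        if PySem.Set.contains changed kv.1 then added
        else if kv.2.any (fun d => PySem.Set.contains changed d) then PySem.Set.add added kv.1
        else added) acc =
      ((l.filter (fun kv =>
        !PySem.Set.contains changed kv.1 && kv.2.any (fun d => PySem.Set.contains changed d))).map (·.1)).foldl
        PySem.Set.add acc := by
    intro l
    induction l with
    | nil => intro acc; rfl
    | cons kv t ih =>
      intro acc
      simp only [List.foldl_cons, List.filter_cons]
      by_cases h1 : PySem.Set.contains changed kv.1 = true
      · have h1' : kv.1 ∈ changed := by simpa using h1
        rw [if_pos h1, if_neg (by simp [h1'])]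
        exact ih acc
      · have hc : PySem.Set.contains changed kv.1 = false := by
          simpa using h1
        by_cases h2 : (kv.2.any (fun d => PySem.Set.contains changed d)) = true
        · have h1' : kv.1 ∉ changed := by simpa using hc
          have h2' : ∃ x ∈ kv.2, x ∈ changed := by simpa using h2
          rw [if_neg h1, if_pos h2, if_pos (by simp [h1', h2'])]
          simp only [List.map_cons, List.foldl_cons]
          exact ih (PySem.Set.add acc kv.1)
        · have h2' : ¬ ∃ x ∈ kv.2, x ∈ changed := by simpa using h2
          rw [if_neg h1, if_neg h2, if_neg (by simp [h2'])]
          exact ih acc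
  rw [pvAddedRound, key, PySem.Set.ofList_eq_foldl]
  rfl

-- main loop correspondence
theorem loop_eq : ∀ (fa fb : Nat) (items : List (String × List String)) (changed frontier : List String),
    (items.map Prod.fst).Nodup →
    (∀ x ∈ frontier, x ∈ changed) →
    (∀ kv ∈ items, kv.1 ∉ changed → ∀ d ∈ kv.2, d ∈ changed → d ∈ frontier) →
    (items.filter (fun kv => !PySem.Set.contains changed kv.1)).length < fa →
    (items.filter (fun kv => !PySem.Set.contains changed kv.1)).length < fb →
    pvLoopA items changed fa =
      pvLoopB changed frontier (items.filter (fun kv => !PySem.Set.contains changed kv.1)) fb := by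
  intro fa
  induction fa with
  | zero => intro fb items changed frontier _ _ _ hfa _; omega
  | succ n ih =>
    intro fb items changed frontier hnd hsub hH hfa hfb
    cases fb with
    | zero => omega
    | succ m =>
    set pending := items.filter (fun kv => !PySem.Set.contains changed kv.1) with hpend
    have hpredeq : ∀ kv ∈ pending, (kv.2.any (fun d => PySem.Set.contains changed d))
        = (kv.2.any (fun d => PySem.Set.contains frontier d)) := by
      intro kv hkv
      have hin : kv ∈ items := List.mem_of_mem_filter hkv
      have hnc : kv.1 ∉ changed := by
        have := List.of_mem_filter hkv
        simpa using this
      cases ha : kv.2.any (fun d => PySem.Set.contains changed d) with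
      | true =>
        rcases List.any_eq_true.1 ha with ⟨d, hd, hdc⟩
        have hdc' : d ∈ changed := by simpa using hdc
        have : d ∈ frontier := hH kv hin hnc d hd hdc'
        exact (List.any_eq_true.2 ⟨d, hd, by simpa using this⟩).symm
      | false =>
        cases hf : kv.2.any (fun d => PySem.Set.contains frontier d) with
        | false => rfl
        | true =>
          rcases List.any_eq_true.1 hf with ⟨d, hd, hdf⟩
          have : d ∈ changed := hsub d (by simpa using hdf)
          have : kv.2.any (fun d => PySem.Set.contains changed d) = true :=
            List.any_eq_true.2 ⟨d, hd, by simpa using this⟩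
          rw [ha] at this; cases this
    -- what A adds this round is exactly (pvNew frontier pending).map fst
    have hnew : items.filter (fun kv =>
        !PySem.Set.contains changed kv.1 && kv.2.any (fun d => PySem.Set.contains changed d))
        = pvNew frontier pending := by
      rw [pvNew, hpend, List.filter_filter]
      apply List.filter_congr
      intro kv hkv
      by_cases hc : (!PySem.Set.contains changed kv.1) = true
      · have hkvp : kv ∈ pending := hpend ▸ List.mem_filter.2 ⟨hkv, hc⟩
        rw [hpredeq kv hkvp]
        simp [Bool.and_comm]
      · have hc' : kv.1 ∈ changed := by
          have : PySem.Set.contains changed kv.1 = true := by simpa using hc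
          simpa using this
        simp [hc']
    have hndnew : ((pvNew frontier pending).map (·.1)).Nodup := by
      have hsl : ((pvNew frontier pending).map (·.1)).Sublist (items.map Prod.fst) := by
        rw [pvNew, hpend, List.filter_filter]
        exact List.filter_sublist.map _
      exact hnd.sublist hsl
    have hadded : pvAddedRound changed items = (pvNew frontier pending).map (·.1) := by
      rw [addedRound_eq, hnew, PySem.Set.ofList_eq_self_of_nodup _ hndnew]
    rw [pvLoopA, pvLoopB, hadded]
    by_cases hemp : pvNew frontier pending = []
    · rw [hemp]; rfl
    · have hne : ((pvNew frontier pending).map (·.1)).isEmpty = false := by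
        cases h : pvNew frontier pending with
        | nil => exact absurd h hemp
        | cons a t => rfl
      have hne' : (pvNew frontier pending).isEmpty = false := by
        cases h : pvNew frontier pending with
        | nil => exact absurd h hemp
        | cons a t => rfl
      rw [hne, hne']
      simp only [Bool.false_eq_true, if_false]
      have hfr' : PySem.Set.ofList ((pvNew frontier pending).map (·.1)) = (pvNew frontier pending).map (·.1) :=
        PySem.Set.ofList_eq_self_of_nodup _ hndnew
      have hfresh : ∀ x ∈ (pvNew frontier pending).map (·.1), x ∉ changed := by
        intro x hx
        rcases List.mem_map.1 hx with ⟨kv, hkv, rfl⟩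
        have hkvp : kv ∈ pending := List.mem_of_mem_filter hkv
        have := List.of_mem_filter (hpend ▸ hkvp : kv ∈ items.filter _)
        simpa using this
      have hunion : PySem.Set.union changed (PySem.Set.ofList ((pvNew frontier pending).map (·.1)))
          = changed ++ (pvNew frontier pending).map (·.1) := by
        rw [hfr']
        apply PySem.Set.update_eq_append_of_disjoint
        exacts [hndnew, hfresh]
      have hpend2 : pending.filter (fun kv =>
            !(PySem.Set.ofList ((pvNew frontier pending).map (·.1))).contains kv.1)
          = items.filter (fun kv =>
            !PySem.Set.contains (changed ++ (pvNew frontier pending).map (·.1)) kv.1) := by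
        conv_lhs => rw [hpend]
        rw [List.filter_filter]
        apply List.filter_congr
        intro kv _
        rw [hfr']
        by_cases h1 : kv.1 ∈ changed <;> by_cases h2 : kv.1 ∈ (pvNew frontier pending).map (·.1) <;>
          simp [h1, h2, List.mem_append]
      have hlt : (items.filter (fun kv =>
            !PySem.Set.contains (changed ++ (pvNew frontier pending).map (·.1)) kv.1)).length
          < pending.length := by
        rw [← hpend2]
        rcases List.exists_mem_of_ne_nil _ hemp with ⟨kv, hkv⟩
        refine length_filter_lt _ _ kv (List.mem_of_mem_filter hkv) ?_
        have hm : kv.1 ∈ (pvNew frontier pending).map (·.1) := List.mem_map_of_mem hkv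
        rw [hfr']
        simp [hm]
      have hunion2 : PySem.Set.union changed ((pvNew frontier pending).map (·.1))
          = changed ++ (pvNew frontier pending).map (·.1) := by
        conv_lhs => rw [← hfr']
        exact hunion
      rw [hunion, hpend2, hfr', hunion2]
      exact ih m items (changed ++ (pvNew frontier pending).map (·.1)) ((pvNew frontier pending).map (·.1)) hnd
        (fun x hx => List.mem_append.2 (Or.inr hx))
        (by
          intro kv hin hnc2 d hd hdc2
          have hnc : kv.1 ∉ changed := fun h => hnc2 (List.mem_append.2 (Or.inl h))
          rcases List.mem_append.1 hdc2 with hdl | hdr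
          · have hdf : d ∈ frontier := hH kv hin hnc d hd hdl
            have hkvp : kv ∈ pending := by
              rw [hpend]
              refine List.mem_filter.2 ⟨hin, ?_⟩
              simpa using hnc
            have hkvnew : kv ∈ pvNew frontier pending := by
              rw [pvNew]
              refine List.mem_filter.2 ⟨hkvp, ?_⟩
              exact List.any_eq_true.2 ⟨d, hd, by simpa using hdf⟩
            exact absurd (List.mem_append.2 (Or.inr (List.mem_map_of_mem hkvnew))) hnc2
          · exact hdr)
        (by omega) (by omega)

-- ===== VERDICT (by name: the statement is the Claim_ definition above) =====
theorem reverse_closure_spec : Claim_equal_reverse_closure := by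
  intro pkgs deps _
  unfold Spec_reverse_closure reverse_closure reverse_closure_alt
  have hnd : ((PySem.Dict.ofList deps).items.map Prod.fst).Nodup := by
    have := PySem.Dict.nodup_keys_ofList (κ := String) (ν := List String) deps
    simpa [PySem.Dict.keys] using this
  exact loop_eq _ _ _ _ _ hnd (fun x hx => hx) (fun kv _ _ d _ hd => hd)
    (Nat.lt_succ_of_le (List.length_filter_le _ _))
    (Nat.lt_succ_of_le (Nat.le_refl _))
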